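-- pv_equiv track=rewrite | github.com/ilkkajos/CSE-431-HW-4 | main.py | adjustments
-- ===== SOURCE A (Python) =====
-- def adjustments(start, target):
--     adjustment=0
--     while start != target:
--         b_num = bin(start)[2::]
--         r_num = b_num[::-1]
--         index = r_num.rfind("1")
--         while (start-2**index) < target:
--             index-=1
--         if (start - 2 ** index) >= target:
--             start = start - 2 ** index
--             adjustment += 1
--     return adjustment
-- ===== SOURCE B (Python) =====
-- def adjustments(start, target):
--     # popcount of the difference: each greedy step of the original removes
--     # exactly the highest set bit of start-target
--     d = start - target
--     count = 0
--     while d: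
--         count += d & 1
--         d >>= 1
--     return count
-- ===== Notes on version B (the rewrite author's own statement) =====
-- stated objective: simpler
-- what changed: Replaces the greedy subtract-largest-power loop (which rebuilds bin(start) as a string and rescans it every iteration) by a single binary popcount loop over start-target.
-- outside the precondition, e.g. on adjustments(-4, -12): A returns 2, B returns 1
import Mathlib
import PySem

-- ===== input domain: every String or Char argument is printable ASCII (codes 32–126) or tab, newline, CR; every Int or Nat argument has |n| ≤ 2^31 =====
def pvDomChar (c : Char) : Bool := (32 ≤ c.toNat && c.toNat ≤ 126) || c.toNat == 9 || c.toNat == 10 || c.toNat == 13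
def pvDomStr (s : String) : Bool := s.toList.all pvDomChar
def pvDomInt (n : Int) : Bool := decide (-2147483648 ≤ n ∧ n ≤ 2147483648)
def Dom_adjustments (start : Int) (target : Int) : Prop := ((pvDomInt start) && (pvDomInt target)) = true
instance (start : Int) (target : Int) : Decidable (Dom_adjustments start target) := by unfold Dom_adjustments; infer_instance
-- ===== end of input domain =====

-- B replaces A's greedy subtract-largest-power loop (rebuilding and rescanning bin(start) each
-- iteration) by a single popcount loop over start - target; return values agree on Pre_.

-- ===== PORT A =====

-- 2 ** index; exact for index ≥ 0 (a negative index gives a Python float, reached only outside Pre_)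
def pvPow2 (i : Int) : Int := 2 ^ i.toNat

-- inner `while (start-2**index) < target: index -= 1`; fuel-guarded (inside Pre_ the loop
-- stops at index ≥ 0, and the fuel passed below is never exhausted)
def pvInner (start target : Int) : Int → Nat → Int
  | index, 0 => index
  | index, fuel+1 =>
    if start - pvPow2 index < target then pvInner start target (index - 1) fuel else index

-- outer `while start != target:` loop; fuel-guarded (each pass subtracts ≥ 1 inside Pre_,
-- so the fuel given in `adjustments` is never exhausted there)
def pvOuter (target : Int) : Int → Int → Nat → Int
  | _, adjustment, 0 => adjustment
  | start, adjustment, fuel+1 =>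
    if start = target then adjustment
    else
      -- b_num = bin(start)[2::]
      let b_num := PySem.List.slice (PySem.Int.toBinChars0b start) (some 2) none
      -- r_num = b_num[::-1]  (step -1 never yields none)
      let r_num := (PySem.List.slice? b_num none none (-1)).getD []
      -- index = r_num.rfind("1")
      let index0 := PySem.Chars.rfind r_num ['1']
      let index := pvInner start target index0 index0.natAbs
      if target ≤ start - pvPow2 index then
        pvOuter target (start - pvPow2 index) (adjustment + 1) fuel
      else
        pvOuter target start adjustment fuel  -- Python repeats the identical state forever here

def adjustments (start : Int) (target : Int) : Int :=
  pvOuter target start 0 ((start - target).natAbs + 1)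

-- ===== PORT B =====

-- `while d: count += d & 1; d >>= 1`; d & 1 = d % 2 and d >>= 1 = d / 2 on the
-- nonnegative d admitted by Pre_ (for d < 0 the Python loop never terminates)
def popLoop : Nat → Int → Int
  | 0, count => count
  | d+1, count => popLoop ((d+1) / 2) (count + ((d+1) % 2 : Nat))
decreasing_by omega

def adjustments_alt (start : Int) (target : Int) : Int :=
  popLoop (start - target).toNat 0

-- ===== PRECONDITION & SPEC =====

-- Natural domain of the task: start ≥ target ≥ 0. Outside it A never returns an intended value:
-- for start < target both programs loop forever; for start ≥ 0 > target A raises TypeError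
-- (float 2**-1 fed to bin); for negative start A slices the '-0b…' string so the letter 'b'
-- enters the digit scan and the returned count is an accident of that slicing.
def Pre_adjustments (start : Int) (target : Int) : Prop := 0 ≤ target ∧ target ≤ start
instance (start : Int) (target : Int) : Decidable (Pre_adjustments start target) := by
  unfold Pre_adjustments; infer_instance

def pvWitness_adjustments : Int × Int := (10, 3)

def Spec_adjustments (start : Int) (target : Int) (out : Int) : Prop := out = adjustments_alt start target
instance (start : Int) (target : Int) (out : Int) : Decidable (Spec_adjustments start target out) := by
  unfold Spec_adjustments; infer_instance

-- ===== CLAIM (what is proved, stated in full; the proofs are below) =====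
def Claim_equal_adjustments : Prop := ∀ (start : Int) (target : Int), Dom_adjustments start target → Pre_adjustments start target → Spec_adjustments start target (adjustments start target)

-- ===== LEMMAS AND PROOFS =====

-- the binary digits of n (MSB first), the mathematical shape of Nat.toDigits 2
def binDigits : Nat → List Char
  | 0 => []
  | n+1 => binDigits ((n+1)/2) ++ [Nat.digitChar ((n+1) % 2)]
decreasing_by omega

lemma log2_eq (n m : Nat) (h1 : 2 ^ m ≤ n) (h2 : n < 2 ^ (m + 1)) : Nat.log2 n = m := by
  have hp : 1 ≤ 2 ^ m := Nat.one_le_two_pow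
  have hn : n ≠ 0 := by omega
  have ha := (Nat.le_log2 hn).2 h1
  have hb := (Nat.log2_lt hn).2 h2
  omega

lemma log2_div2 (n : Nat) (h : 2 ≤ n) : Nat.log2 n = Nat.log2 (n / 2) + 1 := by
  have hd : n / 2 ≠ 0 := by omega
  have h1 : 2 ^ Nat.log2 (n / 2) ≤ n / 2 := Nat.log2_self_le hd
  have h2 : n / 2 < 2 ^ (Nat.log2 (n / 2) + 1) := Nat.lt_log2_self
  exact log2_eq n _ (by omega) (by rw [pow_succ]; omega)

lemma binDigits_len : ∀ n : Nat, n ≠ 0 → (binDigits n).length = Nat.log2 n + 1 := by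
  intro n
  induction n using Nat.strong_induction_on with
  | _ n ih =>
    intro hn
    obtain ⟨d, rfl⟩ : ∃ d, n = d + 1 := ⟨n - 1, by omega⟩
    rw [binDigits]
    rcases Nat.lt_or_ge (d + 1) 2 with h2 | h2
    · have : d = 0 := by omega
      subst this
      simp [binDigits, log2_eq 1 0 (by norm_num) (by norm_num)]
    · rw [List.length_append, ih ((d+1)/2) (by omega) (by omega), log2_div2 _ h2]
      simp

lemma binDigits_head : ∀ n : Nat, n ≠ 0 → ∃ t, binDigits n = '1' :: t := by
  intro n
  induction n using Nat.strong_induction_on with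
  | _ n ih =>
    intro hn
    obtain ⟨d, rfl⟩ : ∃ d, n = d + 1 := ⟨n - 1, by omega⟩
    rw [binDigits]
    rcases Nat.lt_or_ge (d + 1) 2 with h2 | h2
    · have : d = 0 := by omega
      subst this
      exact ⟨[], by simp [binDigits]; rfl⟩
    · obtain ⟨t, ht⟩ := ih ((d+1)/2) (by omega) (by omega)
      exact ⟨t ++ [Nat.digitChar ((d+1) % 2)], by rw [ht]; simp⟩

lemma toDigitsCore_eq : ∀ (fuel n : Nat) (ds : List Char), n ≠ 0 → n < fuel →
    Nat.toDigitsCore 2 fuel n ds = binDigits n ++ ds := by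
  intro fuel
  induction fuel with
  | zero => intro n ds hn hf; omega
  | succ f ih =>
    intro n ds hn hf
    obtain ⟨d, rfl⟩ : ∃ d, n = d + 1 := ⟨n - 1, by omega⟩
    rw [Nat.toDigitsCore]
    by_cases hz : (d + 1) / 2 = 0
    · rw [if_pos hz, binDigits]
      have : d = 0 := by omega
      subst this
      simp [binDigits]
    · rw [if_neg hz, ih ((d+1)/2) _ hz (by omega), binDigits]
      simp

lemma toDigits_eq (n : Nat) (h : n ≠ 0) : Nat.toDigits 2 n = binDigits n := by
  rw [Nat.toDigits, toDigitsCore_eq (n+1) n [] h (by omega)]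
  simp

lemma rfind_append_one (u : List Char) : PySem.Chars.rfind (u ++ ['1']) ['1'] = (u.length : Int) := by
  rw [PySem.Chars.rfind]
  have hlen : (u ++ ['1']).length = u.length + 1 := by simp
  rw [hlen]
  rw [PySem.Chars.rfind.go.eq_def]
  simp only
  have hdrop : (u ++ ['1']).drop (u.length + 1) = [] := by
    rw [show u.length + 1 = (u ++ ['1']).length by simp, List.drop_length]
  rw [hdrop]
  have hfalse : ['1'].isPrefixOf ([] : List Char) = false := rfl
  rw [hfalse]
  simp only [Bool.false_eq_true, if_false]
  match u with
  | [] =>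
    rw [PySem.Chars.rfind.go.eq_def]
    simp [List.isPrefixOf]
  | x :: xs =>
    rw [PySem.Chars.rfind.go.eq_def]
    simp only [List.length_cons]
    have hdrop2 : ((x :: xs) ++ ['1']).drop (xs.length + 1) = ['1'] := by
      rw [show xs.length + 1 = (x :: xs).length by simp, List.drop_left]
    rw [hdrop2]
    simp [List.isPrefixOf]

lemma inner_eq (start target : Int) (m : Nat)
    (h1 : (2:Int)^m ≤ start - target) (h2 : start - target < 2^(m+1)) :
    ∀ (fuel i : Nat), m ≤ i → i - m ≤ fuel → pvInner start target (i : Int) fuel = (m : Int) := by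
  intro fuel
  induction fuel with
  | zero =>
    intro i hmi hf
    have : i = m := by omega
    subst this
    rfl
  | succ f ih =>
    intro i hmi hf
    have hpow : pvPow2 (i : Int) = 2 ^ i := by simp [pvPow2]
    rcases Nat.eq_or_lt_of_le hmi with he | hlt
    · subst he
      rw [pvInner, hpow, if_neg (by omega)]
    · rw [pvInner, hpow, if_pos]
      · rw [show (i : Int) - 1 = ((i - 1 : Nat) : Int) by omega]
        exact ih (i - 1) (by omega) (by omega)
      · have : (2:Int) ^ (m+1) ≤ 2 ^ i := by
          apply pow_le_pow_right₀ (by norm_num) (by omega)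
        omega

lemma popLoop_acc : ∀ (n : Nat) (c : Int), popLoop n c = c + popLoop n 0 := by
  intro n
  induction n using Nat.strong_induction_on with
  | _ n ih =>
    intro c
    match n with
    | 0 => simp [popLoop]
    | d+1 =>
      simp only [popLoop]
      rw [ih ((d+1)/2) (by omega), ih ((d+1)/2) (by omega) (0 + _)]
      ring

lemma popLoop_step (n : Nat) (h : n ≠ 0) :
    popLoop n 0 = ((n % 2 : Nat) : Int) + popLoop (n / 2) 0 := by
  obtain ⟨d, rfl⟩ : ∃ d, n = d + 1 := ⟨n - 1, by omega⟩
  simp only [popLoop]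
  rw [popLoop_acc]
  ring

lemma popLoop_top : ∀ n : Nat, n ≠ 0 → popLoop n 0 = popLoop (n - 2 ^ Nat.log2 n) 0 + 1 := by
  intro n
  induction n using Nat.strong_induction_on with
  | _ n ih =>
    intro hn
    rcases Nat.lt_or_ge n 2 with h2 | h2
    · have hn1 : n = 1 := by omega
      subst hn1
      rw [popLoop_step 1 (by omega), log2_eq 1 0 (by norm_num) (by norm_num)]
      norm_num [popLoop]
    · have hm1 : 1 ≤ Nat.log2 n := (Nat.le_log2 (by omega)).2 (by simpa using h2)
      set m := Nat.log2 n with hmdef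
      have hle : 2 ^ m ≤ n := Nat.log2_self_le (by omega)
      have hlt : n < 2 ^ (m + 1) := Nat.lt_log2_self
      have hpow : 2 ^ m = 2 * 2 ^ (m - 1) := by
        rw [← pow_succ']
        congr 1
        omega
      have hpow2 : 2 ^ (m + 1) = 2 * 2 ^ m := by rw [← pow_succ']
      have hd2 : n / 2 ≠ 0 := by omega
      have hhalf : Nat.log2 (n / 2) = m - 1 :=
        log2_eq _ _ (by omega) (by rw [show m - 1 + 1 = m by omega]; omega)
      rw [popLoop_step n (by omega), ih (n / 2) (by omega) hd2, hhalf]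
      rcases Nat.eq_zero_or_pos (n - 2 ^ m) with hz | hz
      · have hz2 : n / 2 - 2 ^ (m - 1) = 0 := by omega
        have hmod : n % 2 = 0 := by omega
        rw [hz, hz2, hmod]
        simp [popLoop]
      · have key : n / 2 - 2 ^ (m - 1) = (n - 2 ^ m) / 2 := by omega
        have kmod : (n - 2 ^ m) % 2 = n % 2 := by omega
        rw [popLoop_step (n - 2 ^ m) (by omega), kmod, key]
        ring

lemma outer_eq (target : Int) : ∀ (fuel : Nat) (start acc : Int), 0 ≤ target → target ≤ start →
    (start - target).toNat < fuel →
    pvOuter target start acc fuel = acc + popLoop (start - target).toNat 0 := by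
  intro fuel
  induction fuel with
  | zero => intro start acc h1 h2 h3; omega
  | succ f ih =>
    intro start acc h1 h2 h3
    by_cases hst : start = target
    · subst hst
      rw [pvOuter, if_pos rfl]
      simp [popLoop]
    · have hd1 : 1 ≤ start - target := by omega
      have hs1 : 1 ≤ start := by omega
      set dn := (start - target).toNat with hdn
      have hdnc : (dn : Int) = start - target := by omega
      have hdn0 : dn ≠ 0 := by omega
      set m := Nat.log2 dn with hm
      have hml : 2 ^ m ≤ dn := Nat.log2_self_le hdn0
      have hmu : dn < 2 ^ (m + 1) := Nat.lt_log2_self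
      have hpc : ((2 ^ m : Nat) : Int) = 2 ^ m := by push_cast; ring
      have hpc2 : ((2 ^ (m + 1) : Nat) : Int) = 2 ^ (m + 1) := by push_cast; ring
      have h1i : (2 : Int) ^ m ≤ start - target := by omega
      have h2i : start - target < 2 ^ (m + 1) := by omega
      have hsn : start.toNat ≠ 0 := by omega
      have hmle : m ≤ Nat.log2 start.toNat := by
        apply (Nat.le_log2 hsn).2
        omega
      rw [pvOuter, if_neg hst]
      have hbin : PySem.Int.toBinChars0b start = '0' :: 'b' :: Nat.toDigits 2 start.toNat := by
        rw [PySem.Int.toBinChars0b, if_neg (by omega)]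
      have hslice : PySem.List.slice ('0' :: 'b' :: Nat.toDigits 2 start.toNat) (some 2) none
          = Nat.toDigits 2 start.toNat := by
        rw [show ((2:Int)) = ((2:Nat) : Int) by norm_num, PySem.List.slice_from_natCast]
        rfl
      obtain ⟨t, ht⟩ := binDigits_head start.toNat hsn
      have hlen := binDigits_len start.toNat hsn
      have htlen : t.length = Nat.log2 start.toNat := by
        rw [ht] at hlen
        simpa using hlen
      have hrev : (binDigits start.toNat).reverse = t.reverse ++ ['1'] := by
        rw [ht]; simp
      have hrfind : PySem.Chars.rfind (binDigits start.toNat).reverse ['1']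
          = (Nat.log2 start.toNat : Int) := by
        rw [hrev, rfind_append_one]
        simp [htlen]
      simp only [hbin, hslice, PySem.List.slice?_none_none_neg_one, Option.getD_some]
      simp only [toDigits_eq _ hsn, hrfind, Int.natAbs_natCast]
      rw [inner_eq start target m h1i h2i (Nat.log2 start.toNat) (Nat.log2 start.toNat) hmle
        (by omega)]
      have hpm : pvPow2 (m : Int) = 2 ^ m := by simp [pvPow2]
      rw [hpm, if_pos (by omega)]
      have hsub : (start - 2 ^ m - target).toNat = dn - 2 ^ m := by omega
      rw [ih (start - 2 ^ m) (acc + 1) h1 (by omega) (by omega), hsub, popLoop_top dn hdn0]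
      ring

-- ===== VERDICT (by name: the statement is the Claim_ definition above) =====
theorem adjustments_spec : Claim_equal_adjustments := by
  intro start target _ hpre
  obtain ⟨ht, hts⟩ := hpre
  have hn : (start - target).natAbs = (start - target).toNat := by omega
  unfold Spec_adjustments adjustments adjustments_alt
  rw [hn]
  rw [outer_eq target ((start - target).toNat + 1) start 0 ht hts (by omega)]
  ring
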